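-- pv_equiv track=rewrite | github.com/237rahul/20176072 | bag of words 12.py | dic
-- ===== SOURCE A (Python) =====
-- def dic(l,m):
-- 	d={}
-- 	for i in l:
-- 		if i in d :
-- 			d[i]+=1
-- 		else:
-- 			d[i]=1
-- 	for j in m:
-- 		if j not in d and j not in l:
-- 			d[j]=0
-- 	return d
-- ===== SOURCE B (Python) =====
-- def dic(l, m):
--     # Sort-then-scan: counts come from run lengths of sorted(l), not from an
--     # incrementally-updated counter; the output order is rebuilt by a dedup pass.
--     cnt = {}
--     s = sorted(l)
--     while s:
--         k = s[0]
--         j = 0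
--         while j < len(s) and s[j] == k:
--             j += 1
--         cnt[k] = j
--         s = s[j:]
--     d = {}
--     for x in l:
--         if x not in d:
--             d[x] = cnt[x]
--     for y in m:
--         if y not in d:
--             d[y] = 0
--     return d
-- ===== Notes on version B (the rewrite author's own statement) =====
-- stated objective: alternative
-- what changed: B computes the counts by sorting l and measuring run lengths of equal adjacent elements (sort-then-scan) instead of A's one-pass incremental dict counter, then rebuilds the output dict's insertion order with a dedup pass over l followed by the zero-fill pass over m.
import Mathlib
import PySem

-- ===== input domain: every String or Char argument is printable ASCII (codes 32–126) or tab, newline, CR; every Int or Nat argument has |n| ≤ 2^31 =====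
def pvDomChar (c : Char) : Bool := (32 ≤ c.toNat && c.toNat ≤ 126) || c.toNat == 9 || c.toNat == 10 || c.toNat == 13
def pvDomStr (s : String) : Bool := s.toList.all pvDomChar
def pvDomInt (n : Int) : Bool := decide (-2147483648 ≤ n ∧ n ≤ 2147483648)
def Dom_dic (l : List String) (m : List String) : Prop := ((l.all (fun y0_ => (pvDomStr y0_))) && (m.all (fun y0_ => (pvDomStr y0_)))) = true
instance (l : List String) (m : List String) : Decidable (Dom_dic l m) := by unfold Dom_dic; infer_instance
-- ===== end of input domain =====

-- B counts by sorting l and measuring run lengths (sort-then-scan) instead of A's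
-- one-pass incremental counter, then rebuilds A's insertion order by a dedup pass (alternative algorithm).

-- ===== PORT A =====
def dic (l : List String) (m : List String) : List (String × Int) :=
  let d : PySem.Dict String Int :=
    l.foldl (fun d i =>
      if d.contains i then d.insert i (d.getD i 0 + 1) else d.insert i 1) PySem.Dict.empty
  let d2 := m.foldl (fun d j =>
      if ¬ d.contains j ∧ ¬ l.contains j then d.insert j 0 else d) d
  d2.items

-- ===== PORT B =====
-- inner while 'while j < len(s) and s[j] == k: j += 1' : length of the leading run of k
def leadRun : List String → String → Nat
  | [], _ => 0
  | x :: t, k => if x = k then leadRun t k + 1 else 0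

-- outer while 'while s: … ; s = s[j:]' of Source B
def buildCnt (s : List String) (cnt : PySem.Dict String Int) : PySem.Dict String Int :=
  match s with
  | [] => cnt
  | k :: t =>
    let j := leadRun (k :: t) k
    buildCnt ((k :: t).drop j) (cnt.insert k (j : Int))
termination_by s.length
decreasing_by
  simp [leadRun]

def dic_alt (l : List String) (m : List String) : List (String × Int) :=
  let cnt := buildCnt (PySem.List.sorted l (fun x => x) false) PySem.Dict.empty
  -- cnt[x] below: x ∈ l, and cnt's keys are exactly l's elements, so the Python lookup
  -- never raises; getD 0 is exact there.
  let d := l.foldl (fun d x => if ¬ d.contains x then d.insert x (cnt.getD x 0) else d) PySem.Dict.empty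
  let d2 := m.foldl (fun d y => if ¬ d.contains y then d.insert y 0 else d) d
  d2.items

-- ===== PRECONDITION & SPEC =====
def Spec_dic (l : List String) (m : List String) (out : List (String × Int)) : Prop := out = dic_alt l m
instance (l : List String) (m : List String) (out : List (String × Int)) : Decidable (Spec_dic l m out) := by unfold Spec_dic; infer_instance

-- ===== CLAIM (what is proved, stated in full; the proofs are below) =====
def Claim_equal_dic : Prop := ∀ (l : List String) (m : List String), Dom_dic l m → Spec_dic l m (dic l m)

-- ===== LEMMAS AND PROOFS =====

-- A's first loop is the standard counter fold.
theorem dicA_firstLoop (l : List String) :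
    l.foldl (fun d i =>
      if d.contains i then d.insert i (d.getD i 0 + 1) else d.insert i 1) PySem.Dict.empty
    = PySem.Dict.counter l := by
  rw [← PySem.Dict.foldl_insert_getD_add_one_eq_counter]
  apply PySem.List.foldl_congr_mem
  intro d i _
  by_cases h : d.contains i
  · simp [h]
  · rw [if_neg h, PySem.Dict.getD_of_not_contains d 0 (by simpa using h)]
    norm_num

-- every element of the leading run is k
theorem leadRun_take (s : List String) (k : String) :
    ∀ y ∈ s.take (leadRun s k), y = k := by
  induction s with
  | nil => simp
  | cons x t ih =>
    by_cases hx : x = k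
    · simp only [leadRun, if_pos hx, List.take_succ_cons]
      intro y hy
      rcases List.mem_cons.1 hy with h | h
      · exact h ▸ hx
      · exact ih y h
    · simp [leadRun, hx]

-- on a sorted list whose elements all dominate k, the leading run of k is ALL of k's
-- occurrences, and nothing after it equals k
theorem leadRun_sorted (s : List String) (k : String)
    (hle : ∀ y ∈ s, k ≤ y) (hs : s.Pairwise (· ≤ ·)) :
    leadRun s k = s.count k ∧ ∀ y ∈ s.drop (leadRun s k), y ≠ k := by
  induction s with
  | nil => simp [leadRun]
  | cons x t ih =>
    rcases List.pairwise_cons.1 hs with ⟨hxt, ht⟩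
    by_cases hx : x = k
    · subst hx
      have := ih (fun y hy => hxt y hy) ht
      have hL : leadRun (x :: t) x = leadRun t x + 1 := by simp [leadRun]
      rw [hL, List.count_cons_self, List.drop_succ_cons]
      exact ⟨by omega, this.2⟩
    · have hkx : k < x := lt_of_le_of_ne (hle x (by simp)) (fun h => hx h.symm)
      constructor
      · simp only [leadRun, if_neg hx]
        have : k ∉ x :: t := by
          intro hk
          rcases List.mem_cons.1 hk with h | h
          · exact absurd h.symm hx
          · exact absurd (hxt k h) (not_le.2 hkx)
        simp [List.count_eq_zero.2 this]
      · simp only [leadRun, if_neg hx, List.drop_zero]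
        intro y hy he
        subst he
        rcases List.mem_cons.1 hy with h | h
        · exact hx h.symm
        · exact absurd (hxt y h) (not_le.2 hkx)

-- lookups in the run-length dict of a sorted list are exactly counts
theorem buildCnt_get?_aux (n : Nat) : ∀ (s : List String), s.length ≤ n → s.Pairwise (· ≤ ·) →
    ∀ (cnt : PySem.Dict String Int) (x : String),
    (buildCnt s cnt).get? x
      = if x ∈ s then some ((s.count x : Nat) : Int) else cnt.get? x := by
  induction n with
  | zero =>
    intro s hlen _ cnt x
    have : s = [] := List.length_eq_zero_iff.1 (Nat.le_zero.1 hlen)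
    subst this; rw [buildCnt.eq_def]; simp
  | succ n ihn =>
    intro s hlen hs cnt x
    rcases s with _ | ⟨k, t⟩
    · rw [buildCnt.eq_def]; simp
    · have hL : leadRun (k :: t) k = leadRun t k + 1 := by simp [leadRun]
      rcases leadRun_sorted (k :: t) k
          (fun y hy => by
            rcases List.mem_cons.1 hy with h | h
            · exact h ▸ le_refl k
            · exact (List.pairwise_cons.1 hs).1 y h) hs with ⟨hcount, hdrop⟩
      have hdropPW : ((k :: t).drop (leadRun (k :: t) k)).Pairwise (· ≤ ·) :=
        hs.sublist (List.drop_sublist _ _)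
      have hdropLen : ((k :: t).drop (leadRun (k :: t) k)).length ≤ n := by
        rw [hL, List.drop_succ_cons, List.length_drop]
        have hlt : t.length ≤ n := by simpa using Nat.succ_le_succ_iff.1 hlen
        omega
      rw [buildCnt.eq_def]
      dsimp only
      rw [ihn _ hdropLen hdropPW]
      have hsplit : (k :: t).take (leadRun (k :: t) k) ++ (k :: t).drop (leadRun (k :: t) k)
          = k :: t := List.take_append_drop _ _
      by_cases hxk : x = k
      · subst hxk
        have hxnotdrop : x ∉ (x :: t).drop (leadRun (x :: t) x) := fun h => hdrop x h rfl
        rw [if_neg hxnotdrop, if_pos (by simp), PySem.Dict.get?_insert_self, hcount]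
      · have hcnt_eq : ((k :: t).drop (leadRun (k :: t) k)).count x = (k :: t).count x := by
          conv_rhs => rw [← hsplit]
          rw [List.count_append]
          have : ((k :: t).take (leadRun (k :: t) k)).count x = 0 :=
            List.count_eq_zero.2 (fun h => hxk (leadRun_take (k :: t) k x h))
          omega
        have hmem : x ∈ (k :: t).drop (leadRun (k :: t) k) ↔ x ∈ (k :: t) := by
          constructor
          · intro h
            rw [← hsplit]
            exact List.mem_append.2 (Or.inr h)
          · intro h
            rw [← hsplit] at h
            rcases List.mem_append.1 h with h | h
            · exact absurd (leadRun_take (k :: t) k x h) hxk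
            · exact h
        by_cases hx : x ∈ (k :: t)
        · rw [if_pos (hmem.2 hx), if_pos hx, hcnt_eq]
        · rw [if_neg (fun h => hx (hmem.1 h)), if_neg hx,
             PySem.Dict.get?_insert_of_ne _ _ hxk]

theorem buildCnt_get? (s : List String) (hs : s.Pairwise (· ≤ ·))
    (cnt : PySem.Dict String Int) (x : String) :
    (buildCnt s cnt).get? x
      = if x ∈ s then some ((s.count x : Nat) : Int) else cnt.get? x :=
  buildCnt_get?_aux s.length s le_rfl hs cnt x

-- keys of the insert-if-absent fold (B's dict-rebuilding loops)
theorem keys_foldl_insert_absent (f : String → Int) (l : List String)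
    (d : PySem.Dict String Int) :
    (l.foldl (fun d x => if ¬ d.contains x then d.insert x (f x) else d) d).keys
      = PySem.Set.update d.keys l := by
  induction l generalizing d with
  | nil => simp [PySem.Set.update]
  | cons x t ih =>
    rw [List.foldl_cons, PySem.Set.update_cons]
    by_cases h : d.contains x
    · rw [if_neg (by simp [h]),
         PySem.Set.add_of_mem (by simpa [PySem.Dict.contains_iff_mem_keys] using h), ih]
    · rw [if_pos (by simp [h]), ih, PySem.Dict.keys_insert_of_not_contains _ (f x) (by simpa using h),
         PySem.Set.add_of_not_mem (by simpa [PySem.Dict.contains_iff_mem_keys] using h)]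

theorem nodup_keys_foldl_insert_absent (f : String → Int) (l : List String)
    (d : PySem.Dict String Int) (hd : d.keys.Nodup) :
    (l.foldl (fun d x => if ¬ d.contains x then d.insert x (f x) else d) d).keys.Nodup := by
  induction l generalizing d with
  | nil => exact hd
  | cons x t ih =>
    rw [List.foldl_cons]
    by_cases h : d.contains x
    · rw [if_neg (by simp [h])]; exact ih d hd
    · rw [if_pos (by simp [h])]
      exact ih _ (PySem.Dict.nodup_keys_insert _ _ _ hd)

-- lookups through the insert-if-absent fold (value independent of the accumulator)
theorem get?_foldl_insert_absent (f : String → Int) (l : List String)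
    (d : PySem.Dict String Int) (v : String) :
    (l.foldl (fun d x => if ¬ d.contains x then d.insert x (f x) else d) d).get? v
      = if v ∈ l ∧ ¬ d.contains v then some (f v) else d.get? v := by
  induction l generalizing d with
  | nil => simp
  | cons x t ih =>
    rw [List.foldl_cons]
    by_cases h : d.contains x
    · rw [if_neg (by simp [h]), ih]
      by_cases hc : d.contains v
      · simp [hc]
      · have hvx : v ≠ x := fun he => hc (he ▸ h)
        simp [hc, hvx]
    · rw [if_pos (by simp [h]), ih]
      by_cases hvx : v = x
      · subst hvx
        simp [PySem.Dict.get?_insert_self, PySem.Dict.contains_insert_self, h]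
      · simp [PySem.Dict.contains_insert, PySem.Dict.get?_insert_of_ne _ _ hvx, hvx]

-- B's dict after the l-loop IS Counter(l)
theorem dicB_firstLoop (l : List String) :
    (l.foldl (fun d x => if ¬ d.contains x then
        d.insert x ((buildCnt (PySem.List.sorted l (fun x => x) false) PySem.Dict.empty).getD x 0)
      else d) PySem.Dict.empty)
    = PySem.Dict.counter l := by
  set cnt := buildCnt (PySem.List.sorted l (fun x => x) false) PySem.Dict.empty with hcnt
  have hcntD : ∀ x ∈ l, cnt.getD x 0 = ((l.count x : Nat) : Int) := by
    intro x hx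
    have hpw : (PySem.List.sorted l (fun x => x) false).Pairwise (· ≤ ·) := by
      simpa using PySem.List.sorted_pairwise l (fun x => x)
    have hmem : x ∈ PySem.List.sorted l (fun x => x) false :=
      (PySem.List.mem_sorted l (fun x => x) false x).2 hx
    have := buildCnt_get? (PySem.List.sorted l (fun x => x) false) hpw PySem.Dict.empty x
    rw [if_pos hmem] at this
    rw [hcnt, PySem.Dict.getD_eq_get?_getD, this]
    simp [(PySem.List.sorted_perm l (fun x => x) false).count_eq x]
  apply PySem.Dict.ext
  have hnd : (l.foldl (fun d x => if ¬ d.contains x then d.insert x (cnt.getD x 0) else d)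
      PySem.Dict.empty).keys.Nodup :=
    nodup_keys_foldl_insert_absent _ l PySem.Dict.empty (by simp)
  have hkeys : (l.foldl (fun d x => if ¬ d.contains x then d.insert x (cnt.getD x 0) else d)
      PySem.Dict.empty).keys = PySem.Set.ofList l := by
    rw [keys_foldl_insert_absent]
    simp [PySem.Set.update_nil_left]
  rw [PySem.Dict.items_eq_map_keys _ hnd 0,
     PySem.Dict.items_eq_map_keys _ (PySem.Dict.nodup_keys_counter l) 0,
     hkeys, PySem.Dict.keys_counter]
  apply List.map_congr_left
  intro k hk
  have hkl : k ∈ l := (PySem.Set.mem_ofList l k).1 hk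
  have hget := get?_foldl_insert_absent (fun x => cnt.getD x 0) l PySem.Dict.empty k
  rw [if_pos ⟨hkl, by simp⟩] at hget
  rw [PySem.Dict.getD_counter, PySem.Dict.getD_eq_get?_getD, hget, hcntD k hkl]
  simp

-- the two m-loops agree on any dict whose keys cover l
theorem secondLoop_eq (m : List String) (l : List String) (d : PySem.Dict String Int)
    (hcov : ∀ x ∈ l, d.contains x = true) :
    m.foldl (fun d j => if ¬ d.contains j ∧ ¬ l.contains j then d.insert j 0 else d) d
    = m.foldl (fun d j => if ¬ d.contains j then d.insert j 0 else d) d := by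
  induction m generalizing d with
  | nil => rfl
  | cons j t ih =>
    simp only [List.foldl_cons]
    by_cases hc : (d.contains j = true)
    · rw [if_neg (by simp [hc]), if_neg (by simp [hc])]
      exact ih d hcov
    · have hjl : ¬ (l.contains j = true) := fun h => hc (hcov j (by simpa using h))
      rw [if_pos ⟨hc, hjl⟩, if_pos hc]
      refine ih _ ?_
      intro x hx
      simp [PySem.Dict.contains_insert, hcov x hx]

-- ===== VERDICT (by name: the statement is the Claim_ definition above) =====
theorem dic_spec : Claim_equal_dic := by
  intro l m _
  show dic l m = dic_alt l m
  unfold dic dic_alt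
  dsimp only
  rw [dicA_firstLoop, dicB_firstLoop,
     secondLoop_eq m l _ (fun x hx => by simp [PySem.Dict.contains_counter, hx])]
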